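-- pv_equiv track=rewrite | github.com/abhaythakur754-0/parwa | security/api_keys.py | validate_scopes
-- ===== SOURCE A (Python) =====
-- import enum
--
-- class APIKeyScope(str, enum.Enum):
--     """API key permission scopes (BC-011)."""
--
--     READ = "read"  # Read-only access to data
--     WRITE = "write"  # Read + create/update data
--     ADMIN = "admin"  # Full access including delete/settings
--     APPROVAL = "approval"  # Approve/reject actions only
--
-- SCOPE_HIERARCHY = {
--     APIKeyScope.READ: {APIKeyScope.READ},
--     APIKeyScope.WRITE: {APIKeyScope.READ, APIKeyScope.WRITE},
--     APIKeyScope.ADMIN: {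
--         APIKeyScope.READ,
--         APIKeyScope.WRITE,
--         APIKeyScope.ADMIN,
--     },
--     APIKeyScope.APPROVAL: {APIKeyScope.APPROVAL},
-- }
--
-- def validate_scopes(granted_scopes: list, required_scope: str) -> bool:
--     """Check if granted scopes include the required scope.
--
--     BC-011: Scope isolation — read can't write, write can't admin.
--
--     Args:
--         granted_scopes: List of scopes granted to the API key.
--         required_scope: The scope needed for the operation.
--
--     Returns:
--         True if the required scope is covered by granted scopes.
--     """
--     if not granted_scopes:
--         return False
--
--     if required_scope == APIKeyScope.APPROVAL.value:
--         return APIKeyScope.APPROVAL.value in granted_scopes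
--
--     try:
--         required = APIKeyScope(required_scope)
--     except ValueError:
--         return False
--
--     for scope_str in granted_scopes:
--         try:
--             scope = APIKeyScope(scope_str)
--             allowed = SCOPE_HIERARCHY.get(scope, set())
--             if required in allowed:
--                 return True
--         except ValueError:
--             continue
--
--     return False
-- ===== SOURCE B (Python) =====
-- _LEVEL = {"read": 1, "write": 2, "admin": 3}
--
-- def validate_scopes(granted_scopes: list, required_scope: str) -> bool:
--     if not granted_scopes:
--         return False
--     if required_scope == "approval":
--         return "approval" in granted_scopes
--     req = _LEVEL.get(required_scope)
--     if req is None: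
--         return False
--     best = max((_LEVEL.get(s, 0) for s in granted_scopes), default=0)
--     return best >= req
-- ===== Notes on version B (the rewrite author's own statement) =====
-- stated objective: idiomatic
-- what changed: Replaces the enum/coverage-set hierarchy and per-element membership loop with ordinal levels (read=1, write=2, admin=3): compute the maximum granted level once, then a single comparison against the required level; approval stays the isolated string-membership guard.
import Mathlib
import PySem

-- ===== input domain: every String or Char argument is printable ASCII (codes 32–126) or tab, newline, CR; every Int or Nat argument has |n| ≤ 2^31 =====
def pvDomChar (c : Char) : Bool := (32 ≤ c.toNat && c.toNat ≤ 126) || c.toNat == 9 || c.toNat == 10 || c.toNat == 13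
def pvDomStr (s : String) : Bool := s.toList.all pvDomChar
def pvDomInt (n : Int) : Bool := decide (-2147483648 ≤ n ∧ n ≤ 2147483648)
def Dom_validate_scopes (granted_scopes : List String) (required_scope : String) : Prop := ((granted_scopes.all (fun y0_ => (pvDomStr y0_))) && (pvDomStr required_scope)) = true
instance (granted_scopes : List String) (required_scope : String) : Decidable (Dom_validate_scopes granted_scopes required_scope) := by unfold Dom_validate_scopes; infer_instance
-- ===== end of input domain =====

-- B replaces A's enum coverage-sets and early-exit loop by ordinal levels (read=1, write=2, admin=3):
-- compute the maximum granted level once and compare it with the required level (idiomatic; same cost).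

-- ===== PORT A =====
inductive APIKeyScope | READ | WRITE | ADMIN | APPROVAL
deriving DecidableEq, Repr

-- APIKeyScope(s): some on the four valid values, none = ValueError
def parseScope (s : String) : Option APIKeyScope :=
  if s = "read" then some .READ
  else if s = "write" then some .WRITE
  else if s = "admin" then some .ADMIN
  else if s = "approval" then some .APPROVAL
  else none

-- SCOPE_HIERARCHY.get(scope, set()) (sets as lists of distinct enum members)
def scopeHierarchy (s : APIKeyScope) : List APIKeyScope :=
  match s with
  | .READ => [.READ]
  | .WRITE => [.READ, .WRITE]
  | .ADMIN => [.READ, .WRITE, .ADMIN]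
  | .APPROVAL => [.APPROVAL]

-- the for-loop over granted_scopes, with try/except ValueError → skip
def validateLoop (gs : List String) (required : APIKeyScope) : Bool :=
  match gs with
  | [] => false
  | s :: rest =>
    match parseScope s with
    | some scope => if required ∈ scopeHierarchy scope then true else validateLoop rest required
    | none => validateLoop rest required

def validate_scopes (granted_scopes : List String) (required_scope : String) : Bool :=
  if granted_scopes = [] then false
  else if required_scope = "approval" then granted_scopes.contains "approval"
  else
    match parseScope required_scope with
    | none => false
    | some required => validateLoop granted_scopes required

-- ===== PORT B =====
-- _LEVEL.get(s) : read=1, write=2, admin=3, else None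
def levelOf (s : String) : Option Int :=
  if s = "read" then some 1
  else if s = "write" then some 2
  else if s = "admin" then some 3
  else none

def validate_scopes_alt (granted_scopes : List String) (required_scope : String) : Bool :=
  if granted_scopes = [] then false
  else if required_scope = "approval" then granted_scopes.contains "approval"
  else
    match levelOf required_scope with
    | none => false
    | some req =>
      -- best = max(( _LEVEL.get(s,0) for s in granted_scopes), default=0)
      let best := (granted_scopes.map (fun s => (levelOf s).getD 0)).foldl max 0
      decide (best ≥ req)

-- ===== PRECONDITION & SPEC =====
def Spec_validate_scopes (granted_scopes : List String) (required_scope : String) (out : Bool) : Prop := out = validate_scopes_alt granted_scopes required_scope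
instance (granted_scopes : List String) (required_scope : String) (out : Bool) : Decidable (Spec_validate_scopes granted_scopes required_scope out) := by unfold Spec_validate_scopes; infer_instance

-- ===== CLAIM (what is proved, stated in full; the proofs are below) =====
def Claim_equal_validate_scopes : Prop := ∀ (granted_scopes : List String) (required_scope : String), Dom_validate_scopes granted_scopes required_scope → Spec_validate_scopes granted_scopes required_scope (validate_scopes granted_scopes required_scope)

-- ===== LEMMAS AND PROOFS =====

theorem foldl_max_ge (l : List Int) (a b : Int) :
    (l.foldl max a ≥ b) ↔ (a ≥ b ∨ ∃ x ∈ l, x ≥ b) := by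
  induction l generalizing a with
  | nil => simp
  | cons x xs ih =>
    simp only [List.foldl_cons, ih, List.mem_cons]
    constructor
    · rintro (h | ⟨y, hy, hyb⟩)
      · rcases le_max_iff.mp h with h | h
        · exact Or.inl h
        · exact Or.inr ⟨x, Or.inl rfl, h⟩
      · exact Or.inr ⟨y, Or.inr hy, hyb⟩
    · rintro (h | ⟨y, hy | hy, hyb⟩)
      · exact Or.inl (le_trans h (le_max_left _ _))
      · subst hy; exact Or.inl (le_trans hyb (le_max_right _ _))
      · exact Or.inr ⟨y, hy, hyb⟩

-- pointwise bridge: A's per-element membership test equals B's level comparison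
theorem point_eq (required : APIKeyScope) (r : Int)
    (hp : (required = .READ ∧ r = 1) ∨ (required = .WRITE ∧ r = 2) ∨ (required = .ADMIN ∧ r = 3))
    (s : String) :
    (match parseScope s with
     | some scope => decide (required ∈ scopeHierarchy scope)
     | none => false) = decide ((levelOf s).getD 0 ≥ r) := by
  unfold parseScope levelOf
  split_ifs <;> rcases hp with ⟨hq, hr⟩ | ⟨hq, hr⟩ | ⟨hq, hr⟩ <;> subst hq <;> subst hr <;> decide

theorem loop_eq (gs : List String) (required : APIKeyScope) (r : Int)
    (hp : (required = .READ ∧ r = 1) ∨ (required = .WRITE ∧ r = 2) ∨ (required = .ADMIN ∧ r = 3)) :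
    validateLoop gs required = decide ((gs.map (fun s => (levelOf s).getD 0)).foldl max 0 ≥ r) := by
  have hr1 : (1 : Int) ≤ r := by rcases hp with ⟨_, h⟩ | ⟨_, h⟩ | ⟨_, h⟩ <;> omega
  induction gs with
  | nil => simp [validateLoop, show ¬ ((0:Int) ≥ r) by omega]
  | cons s rest ih =>
    have hpt := point_eq required r hp s
    have hmax : ((List.map (fun s => (levelOf s).getD 0) (s :: rest)).foldl max 0 ≥ r)
        ↔ (((levelOf s).getD 0 ≥ r) ∨ ((List.map (fun s => (levelOf s).getD 0) rest).foldl max 0 ≥ r)) := by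
      rw [foldl_max_ge, foldl_max_ge]
      simp only [List.map_cons, List.mem_cons, List.mem_map]
      constructor
      · rintro (h | ⟨x, (hx | ⟨y, hy, rfl⟩), hb⟩)
        · omega
        · subst hx; exact Or.inl hb
        · exact Or.inr (Or.inr ⟨_, ⟨y, hy, rfl⟩, hb⟩)
      · rintro (h | h | ⟨x, hx, hb⟩)
        · exact Or.inr ⟨_, Or.inl rfl, h⟩
        · omega
        · exact Or.inr ⟨x, Or.inr hx, hb⟩
    unfold validateLoop
    cases hps : parseScope s with
    | none =>
      simp only [hps] at hpt ⊢
      rw [ih]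
      have : ¬ ((levelOf s).getD 0 ≥ r) := by
        intro h; rw [show decide ((levelOf s).getD 0 ≥ r) = true from decide_eq_true h] at hpt
        exact Bool.false_ne_true hpt
      simp only [decide_eq_decide]
      rw [hmax]
      tauto
    | some scope =>
      simp only [hps] at hpt
      by_cases hmem : required ∈ scopeHierarchy scope
      · simp only [hmem, if_pos]
        have hlev : (levelOf s).getD 0 ≥ r := by
          rw [decide_eq_true hmem] at hpt; exact of_decide_eq_true hpt.symm
        exact (decide_eq_true (hmax.mpr (Or.inl hlev))).symm
      · simp only [hmem, if_neg, not_false_iff]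
        rw [ih]
        have hlev : ¬ ((levelOf s).getD 0 ≥ r) := by
          intro h; rw [decide_eq_true h] at hpt
          exact hmem (of_decide_eq_true hpt)
        simp only [decide_eq_decide]
        rw [hmax]
        tauto

-- ===== VERDICT (by name: the statement is the Claim_ definition above) =====
theorem validate_scopes_spec : Claim_equal_validate_scopes := by
  intro gs rs _
  unfold Spec_validate_scopes validate_scopes validate_scopes_alt
  by_cases h0 : gs = []
  · simp [h0]
  · rw [if_neg h0, if_neg h0]
    by_cases hap : rs = "approval"
    · simp [hap]
    · rw [if_neg hap, if_neg hap]
      unfold parseScope levelOf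
      split_ifs with h1 h2 h3
      · exact loop_eq gs .READ 1 (by tauto)
      · exact loop_eq gs .WRITE 2 (by tauto)
      · exact loop_eq gs .ADMIN 3 (by tauto)
      · rfl
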